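-- pv_equiv track=rewrite | github.com/polirritmico/codesignal_solutions | Python/amazonCheckmate.py | fill_amazon_diagonals
-- ===== SOURCE A (Python) =====
-- def fill_amazon_diagonals(
--     amazon_col: int, amazon_row: int, board: list[list[str]]
-- ) -> list[list[str]]:
--     for row, col in zip(range(amazon_row - 1, -1, -1), range(amazon_col - 1, -1, -1)):
--         if board[row][col] == "K":
--             break
--         if board[row][col] == "*":
--             board[row][col] = "a"
--     for row, col in zip(range(amazon_row - 1, -1, -1), range(amazon_col + 1, 8)):
--         if board[row][col] == "K":
--             break
--         if board[row][col] == "*":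
--             board[row][col] = "a"
--     for row, col in zip(range(amazon_row + 1, 8), range(amazon_col - 1, -1, -1)):
--         if board[row][col] == "K":
--             break
--         if board[row][col] == "*":
--             board[row][col] = "a"
--     for row, col in zip(range(amazon_row + 1, 8), range(amazon_col + 1, 8)):
--         if board[row][col] == "K":
--             break
--         if board[row][col] == "*":
--             board[row][col] = "a"
--     return board
-- ===== SOURCE B (Python) =====
-- def fill_amazon_diagonals(amazon_col, amazon_row, board):
--     # Phase 1: recursively collect the coordinates of all '*' squares the amazon
--     # attacks diagonally (walking outward, stopping past the board edge or at a 'K'),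
--     # reading only the original board. Phase 2: write them all in one batch.
--     def scan(r, c, dr, dc):
--         if (r < 0 if dr < 0 else r > 7) or (c < 0 if dc < 0 else c > 7):
--             return []
--         if board[r][c] == "K":
--             return []
--         rest = scan(r + dr, c + dc, dr, dc)
--         return [(r, c)] + rest if board[r][c] == "*" else rest
--
--     marks = []
--     for dr in (-1, 1):
--         for dc in (-1, 1):
--             marks += scan(amazon_row + dr, amazon_col + dc, dr, dc)
--     for r, c in marks:
--         board[r][c] = "a"
--     return board
-- ===== Notes on version B (the rewrite author's own statement) =====
-- stated objective: alternative
-- what changed: B is two-phase: a recursive scan first collects (reading only the original board) the coordinates of every '*' square reachable before a blocker on each diagonal, then one batch pass writes 'a' to them, whereas A interleaves reads and in-place writes inside four hand-unrolled zip(range,range) loops; correctness rests on the fact that writing 'a' never changes a 'K' test and is idempotent, so deferring the writes is sound.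
import Mathlib
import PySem

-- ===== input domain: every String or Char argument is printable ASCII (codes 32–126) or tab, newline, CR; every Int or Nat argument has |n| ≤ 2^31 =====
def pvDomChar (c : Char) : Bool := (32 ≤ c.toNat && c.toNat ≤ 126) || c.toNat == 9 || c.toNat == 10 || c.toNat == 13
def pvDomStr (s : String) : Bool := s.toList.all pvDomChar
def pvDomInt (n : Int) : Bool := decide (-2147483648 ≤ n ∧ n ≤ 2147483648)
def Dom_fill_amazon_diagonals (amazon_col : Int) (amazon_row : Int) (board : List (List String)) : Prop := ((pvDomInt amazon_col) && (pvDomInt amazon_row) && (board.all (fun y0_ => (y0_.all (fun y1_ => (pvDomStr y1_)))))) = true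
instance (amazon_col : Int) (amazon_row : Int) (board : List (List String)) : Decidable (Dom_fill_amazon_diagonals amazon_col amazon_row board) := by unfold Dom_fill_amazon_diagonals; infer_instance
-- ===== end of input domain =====

-- B is two-phase (collect all attacked '*' coordinates from the original board, then batch-write
-- them) where A interleaves reads and writes in four unrolled zip loops. Both Pythons mutate the
-- board argument in place to the same final state; the equivalence proved here is about the
-- return value.

-- cell lookup board[r][c] with Python index semantics (negative wraps; none = IndexError)
def pvCell (b : List (List String)) (r c : Int) : Option String :=
  (PySem.List.pyGet? b r).bind (fun row => PySem.List.pyGet? row c)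

-- board[r][c] = v (always in range when reached inside Pre_)
def pvSet2 (b : List (List String)) (r c : Int) (v : String) : List (List String) :=
  match PySem.List.pyGet? b r with
  | none => b
  | some row => PySem.List.pySetD b r (PySem.List.pySetD row c v)

-- ===== PORT A =====
-- one of A's 'for row, col in zip(...)' loops with its break (none = IndexError, excluded by Pre_)
def pvWalkA : List (Int × Int) → List (List String) → List (List String)
  | [], b => b
  | (r, c) :: rest, b =>
    match pvCell b r c with
    | none => b
    | some s =>
      if s = "K" then b
      else if s = "*" then pvWalkA rest (pvSet2 b r c "a")
      else pvWalkA rest b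

def fill_amazon_diagonals (amazon_col : Int) (amazon_row : Int) (board : List (List String)) : List (List String) :=
  let b1 := pvWalkA ((PySem.List.pyRange (amazon_row - 1) (-1) (-1)).zip (PySem.List.pyRange (amazon_col - 1) (-1) (-1))) board
  let b2 := pvWalkA ((PySem.List.pyRange (amazon_row - 1) (-1) (-1)).zip (PySem.List.pyRange (amazon_col + 1) 8 1)) b1
  let b3 := pvWalkA ((PySem.List.pyRange (amazon_row + 1) 8 1).zip (PySem.List.pyRange (amazon_col - 1) (-1) (-1))) b2
  pvWalkA ((PySem.List.pyRange (amazon_row + 1) 8 1).zip (PySem.List.pyRange (amazon_col + 1) 8 1)) b3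

-- ===== PORT B =====
-- Source B's recursive 'scan': collect the coordinates of the '*' squares along one diagonal,
-- reading only the original board (fuel is a totality guard only; it never runs out on the
-- recursion Source B performs, see pvScan_eq_collectI)
def pvScan : Nat → Int → Int → Int → Int → List (List String) → List (Int × Int)
  | 0, _, _, _, _, _ => []
  | fuel + 1, r, c, dr, dc, b =>
    if (if dr < 0 then r < 0 else r > 7) ∨ (if dc < 0 then c < 0 else c > 7) then []
    else
      match pvCell b r c with
      | none => []
      | some s =>
        if s = "K" then []
        else
          let rest := pvScan fuel (r + dr) (c + dc) dr dc b
          if s = "*" then (r, c) :: rest else rest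

-- Source B: marks = scan over the four directions (in the order (-1,-1),(-1,1),(1,-1),(1,1)),
-- then one write pass 'board[r][c] = "a"' over marks
def fill_amazon_diagonals_alt (amazon_col : Int) (amazon_row : Int) (board : List (List String)) : List (List String) :=
  let fuel := amazon_row.natAbs + amazon_col.natAbs + 20
  let marks :=
    pvScan fuel (amazon_row - 1) (amazon_col - 1) (-1) (-1) board ++
    pvScan fuel (amazon_row - 1) (amazon_col + 1) (-1) 1 board ++
    pvScan fuel (amazon_row + 1) (amazon_col - 1) 1 (-1) board ++
    pvScan fuel (amazon_row + 1) (amazon_col + 1) 1 1 board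
  marks.foldl (fun b p => pvSet2 b p.1 p.2 "a") board

-- ===== PRECONDITION & SPEC =====
-- cell at p exists and is not the king (so A's walk continues past it)
def pvAlive (b : List (List String)) (p : Int × Int) : Bool :=
  match pvCell b p.1 p.2 with
  | none => false
  | some s => s != "K"

-- every access A performs along this list of squares is in range: the k-th square must exist
-- whenever all earlier squares exist and are not "K" (a "K" breaks the loop before later squares)
def pvSafe (b : List (List String)) (ps : List (Int × Int)) : Bool :=
  (List.range ps.length).all fun k =>
    !((ps.take k).all (pvAlive b)) || (pvCell b (ps.getD k (0, 0)).1 (ps.getD k (0, 0)).2).isSome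

-- Pre_ holds exactly on the inputs where the Python A returns (elsewhere it raises IndexError):
-- every board access of each of the four diagonal walks is in range. The coordinates fed to the
-- range lists are clamped only to keep the check linear-time; whenever the clamp changes them the
-- bounds conjunct is already false (an unclamped coordinate that large makes A's first access raise).
def Pre_fill_amazon_diagonals (amazon_col : Int) (amazon_row : Int) (board : List (List String)) : Prop :=
  let L : Int := board.length
  let M : Int := (board.map (fun r => (r.length : Int))).foldr max 0
  let ar : Int := max (-L - 2) (min amazon_row (L + 1))
  let ac : Int := max (-M - 2) (min amazon_col (M + 1))
  (-L - 1 ≤ amazon_row ∧ amazon_row ≤ L ∧ -M - 1 ≤ amazon_col ∧ amazon_col ≤ M) ∧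
  pvSafe board ((PySem.List.pyRange (ar - 1) (-1) (-1)).zip (PySem.List.pyRange (ac - 1) (-1) (-1))) = true ∧
  pvSafe board ((PySem.List.pyRange (ar - 1) (-1) (-1)).zip (PySem.List.pyRange (ac + 1) 8 1)) = true ∧
  pvSafe board ((PySem.List.pyRange (ar + 1) 8 1).zip (PySem.List.pyRange (ac - 1) (-1) (-1))) = true ∧
  pvSafe board ((PySem.List.pyRange (ar + 1) 8 1).zip (PySem.List.pyRange (ac + 1) 8 1)) = true
instance (amazon_col : Int) (amazon_row : Int) (board : List (List String)) : Decidable (Pre_fill_amazon_diagonals amazon_col amazon_row board) := by unfold Pre_fill_amazon_diagonals; infer_instance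

def pvWitness_fill_amazon_diagonals : Int × Int × List (List String) :=
  (3, 4, [["*", "*", "*", "*", "*", "*", "*", "*"],
          ["*", "*", "*", "*", "*", "*", "*", "*"],
          ["*", "*", "*", "K", "*", "*", "*", "*"],
          ["*", "*", "*", "*", "*", "*", "*", "*"],
          ["*", "*", "*", "A", "*", "*", "*", "*"],
          ["*", "*", "*", "*", "*", "*", "*", "*"],
          ["*", "*", "*", "*", "*", "*", "*", "*"],
          ["*", "*", "*", "*", "*", "*", "*", "*"]])

def Spec_fill_amazon_diagonals (amazon_col : Int) (amazon_row : Int) (board : List (List String)) (out : List (List String)) : Prop := out = fill_amazon_diagonals_alt amazon_col amazon_row board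
instance (amazon_col : Int) (amazon_row : Int) (board : List (List String)) (out : List (List String)) : Decidable (Spec_fill_amazon_diagonals amazon_col amazon_row board out) := by unfold Spec_fill_amazon_diagonals; infer_instance

-- ===== CLAIM (what is proved, stated in full; the proofs are below) =====
def Claim_equal_fill_amazon_diagonals : Prop := ∀ (amazon_col : Int) (amazon_row : Int) (board : List (List String)), Dom_fill_amazon_diagonals amazon_col amazon_row board → Pre_fill_amazon_diagonals amazon_col amazon_row board → Spec_fill_amazon_diagonals amazon_col amazon_row board (fill_amazon_diagonals amazon_col amazon_row board)

-- ===== LEMMAS AND PROOFS =====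

-- the physical (row, column) a Python index pair resolves to on this board shape
def pvPhys (b : List (List String)) (r c : Int) : Option (Nat × Nat) :=
  match PySem.List.pyIdx? b.length r with
  | none => none
  | some k => (PySem.List.pyIdx? (b.getD k []).length c).map (fun j => (k, j))

def pvCellP (b : List (List String)) (p : Nat × Nat) : String := (b.getD p.1 []).getD p.2 ""

def pvSetP (b : List (List String)) (p : Nat × Nat) (v : String) : List (List String) :=
  b.set p.1 ((b.getD p.1 []).set p.2 v)

def pvValid (b : List (List String)) (p : Nat × Nat) : Prop :=
  p.1 < b.length ∧ p.2 < (b.getD p.1 []).length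

-- collect on physical squares (A's control flow, reading a fixed board)
def pvCollectP : List (Int × Int) → List (List String) → List (Nat × Nat)
  | [], _ => []
  | (r, c) :: rest, b =>
    match pvPhys b r c with
    | none => []
    | some q =>
      if pvCellP b q = "K" then []
      else if pvCellP b q = "*" then q :: pvCollectP rest b
      else pvCollectP rest b

-- collect on Python coordinates (what one scan of Source B produces)
def pvCollectI : List (Int × Int) → List (List String) → List (Int × Int)
  | [], _ => []
  | (r, c) :: rest, b =>
    match pvCell b r c with
    | none => []
    | some s =>
      if s = "K" then []
      else if s = "*" then (r, c) :: pvCollectI rest b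
      else pvCollectI rest b

def pvFR (L : List (Nat × Nat)) (b : List (List String)) : List (List String) :=
  L.foldr (fun p acc => pvSetP acc p "a") b

def pvFL (L : List (Nat × Nat)) (b : List (List String)) : List (List String) :=
  L.foldl (fun acc p => pvSetP acc p "a") b

-- the squares one diagonal visits: n steps from (r, c) in direction (dr, dc)
def pvPathN : Nat → Int → Int → Int → Int → List (Int × Int)
  | 0, _, _, _, _ => []
  | n + 1, r, c, dr, dc => (r + dr, c + dc) :: pvPathN n (r + dr) (c + dc) dr dc

-- ----- index / cell / write primitives -----

theorem pvIdx_lt {n : Nat} {i : Int} {k : Nat} (h : PySem.List.pyIdx? n i = some k) : k < n := by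
  simp only [PySem.List.pyIdx?] at h
  split_ifs at h with h1 h2 h3 <;> simp_all <;> omega

theorem pvGet_eq_idx {α : Type} (xs : List α) (i : Int) :
    PySem.List.pyGet? xs i = (PySem.List.pyIdx? xs.length i).bind (fun k => xs[k]?) := rfl

theorem pvSetD_eq_idx {α : Type} (xs : List α) (i : Int) (v : α) :
    PySem.List.pySetD xs i v = match PySem.List.pyIdx? xs.length i with
      | none => xs
      | some k => xs.set k v := by
  simp only [PySem.List.pySetD, PySem.List.pySet?]
  cases h : PySem.List.pyIdx? xs.length i <;> simp

theorem pvCell_eq_phys (b : List (List String)) (r c : Int) :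
    pvCell b r c = (pvPhys b r c).map (pvCellP b) := by
  simp only [pvCell, pvPhys, pvGet_eq_idx]
  cases h : PySem.List.pyIdx? b.length r with
  | none => rfl
  | some k =>
    have hk := pvIdx_lt h
    have hb : b[k]? = some (b.getD k []) := by
      simp [List.getElem?_eq_getElem hk, List.getD_eq_getElem _ _ hk]
    simp only [hb, Option.bind]
    cases h2 : PySem.List.pyIdx? (b.getD k []).length c with
    | none => rfl
    | some j =>
      have hj := pvIdx_lt h2
      have hrow : b.getD k [] = b[k]?.getD [] := by simp [List.getD]
      rw [hrow] at hj
      simp only [pvCellP, Option.map_some, List.getD, hrow]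
      rw [List.getElem?_eq_getElem hj]
      simp

theorem pvSet2_eq_phys (b : List (List String)) (r c : Int) (v : String) :
    pvSet2 b r c v = match pvPhys b r c with
      | none => b
      | some p => pvSetP b p v := by
  simp only [pvSet2, pvPhys, pvGet_eq_idx]
  cases h : PySem.List.pyIdx? b.length r with
  | none => rfl
  | some k =>
    have hk := pvIdx_lt h
    have hb : b[k]? = some (b.getD k []) := by
      simp [List.getElem?_eq_getElem hk, List.getD_eq_getElem _ _ hk]
    simp only [hb, Option.bind, pvSetD_eq_idx, h]
    cases h2 : PySem.List.pyIdx? (b.getD k []).length c with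
    | none =>
      simp only [h2, Option.map_none]
      rw [List.getD_eq_getElem _ _ hk, List.set_getElem_self hk]
    | some j =>
      simp only [h2, Option.map_some]
      rfl

theorem pvLength_setP (b : List (List String)) (p : Nat × Nat) (v : String) :
    (pvSetP b p v).length = b.length := by
  simp [pvSetP]

theorem pvRowLen_setP (b : List (List String)) (p : Nat × Nat) (v : String) (k : Nat) :
    ((pvSetP b p v).getD k []).length = (b.getD k []).length := by
  simp only [pvSetP, List.getD, List.getElem?_set]
  by_cases h : p.1 = k <;> by_cases h2 : p.1 < b.length <;> simp only [h, h2, if_true, if_false]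
  · subst h; simp [h2]
  · subst h; simp [h2]

theorem pvPhys_setP (b : List (List String)) (p : Nat × Nat) (v : String) (r c : Int) :
    pvPhys (pvSetP b p v) r c = pvPhys b r c := by
  have h1 := pvLength_setP b p v
  have h2 := pvRowLen_setP b p v
  simp only [pvPhys, h1]
  cases PySem.List.pyIdx? b.length r with
  | none => rfl
  | some k => simp only [h2]

theorem pvValid_setP (b : List (List String)) (p q : Nat × Nat) (v : String) :
    pvValid (pvSetP b p v) q ↔ pvValid b q := by
  have h2 := pvRowLen_setP b p v q.1
  simp only [pvValid, pvLength_setP, h2]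

theorem pvPhys_valid {b : List (List String)} {r c : Int} {p : Nat × Nat}
    (h : pvPhys b r c = some p) : pvValid b p := by
  simp only [pvPhys] at h
  cases h1 : PySem.List.pyIdx? b.length r with
  | none => simp [h1] at h
  | some k =>
    simp only [h1] at h
    cases h2 : PySem.List.pyIdx? (b.getD k []).length c with
    | none =>
      simp only [List.getD] at h2
      simp [h2] at h
    | some j =>
      simp only [h2, Option.map_some] at h
      cases h
      exact ⟨pvIdx_lt h1, pvIdx_lt h2⟩

theorem pvCellP_setP_self {b : List (List String)} {p : Nat × Nat} (v : String)
    (h : pvValid b p) : pvCellP (pvSetP b p v) p = v := by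
  obtain ⟨h1, h2⟩ := h
  simp only [pvCellP, pvSetP, List.getD] at *
  rw [List.getElem?_set_self (by omega), Option.getD_some,
    List.getElem?_set_self (by simpa using h2), Option.getD_some]

theorem pvCellP_setP_ne {b : List (List String)} {p q : Nat × Nat} (v : String)
    (h : q ≠ p) : pvCellP (pvSetP b p v) q = pvCellP b q := by
  obtain ⟨p1, p2⟩ := p
  obtain ⟨q1, q2⟩ := q
  simp only [pvCellP, pvSetP, List.getD]
  by_cases hr : q1 = p1
  · subst hr
    have hc : p2 ≠ q2 := fun hc => h (by rw [hc])
    by_cases hl : q1 < b.length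
    · rw [List.getElem?_set_self hl, Option.getD_some, List.getElem?_set_ne hc]
    · rw [List.set_eq_of_length_le (by omega)]
  · rw [List.getElem?_set_ne (fun hh => hr hh.symm)]

theorem pvSetP_invalid {b : List (List String)} {p : Nat × Nat} (v : String)
    (h : ¬ pvValid b p) : pvSetP b p v = b := by
  simp only [pvValid, pvSetP] at *
  by_cases h1 : p.1 < b.length
  · have h2 : ¬ p.2 < (b.getD p.1 []).length := fun hh => h ⟨h1, hh⟩
    rw [List.set_eq_of_length_le (by omega : (b.getD p.1 []).length ≤ p.2)]
    simp only [List.getD]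
    have hg : b[p.1]?.getD [] = b[p.1] := by simp [List.getElem?_eq_getElem h1]
    rw [hg, List.set_getElem_self h1]
  · exact List.set_eq_of_length_le (by omega)

-- a write changes a cell to the written value or leaves it alone
theorem pvCellP_setP_cases (b : List (List String)) (p q : Nat × Nat) (v : String) :
    pvCellP (pvSetP b p v) q = v ∨ pvCellP (pvSetP b p v) q = pvCellP b q := by
  by_cases h : q = p
  · subst h
    by_cases hv : pvValid b q
    · exact Or.inl (pvCellP_setP_self v hv)
    · refine Or.inr ?_
      rw [pvSetP_invalid v hv]
  · exact Or.inr (pvCellP_setP_ne v h)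

theorem pvSetP_same {b : List (List String)} {p : Nat × Nat} {v : String}
    (hv : pvValid b p) (h : pvCellP b p = v) : pvSetP b p v = b := by
  obtain ⟨p1, p2⟩ := p
  obtain ⟨h1, h2⟩ := hv
  simp only [pvCellP, pvSetP, List.getD] at *
  have hg : b[p1]?.getD [] = b[p1] := by simp [List.getElem?_eq_getElem h1]
  rw [hg] at h2 h ⊢
  rw [List.getElem?_eq_getElem h2, Option.getD_some] at h
  rw [← h, List.set_getElem_self h2, List.set_getElem_self h1]


theorem pvSetP_comm (b : List (List String)) (p q : Nat × Nat) (v : String) :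
    pvSetP (pvSetP b p v) q v = pvSetP (pvSetP b q v) p v := by
  simp only [pvSetP, List.getD]
  by_cases hr : p.1 = q.1
  · rw [← hr]
    by_cases hl : p.1 < b.length
    · rw [List.getElem?_set_self hl, List.getElem?_set_self hl, Option.getD_some, Option.getD_some,
        List.set_set, List.set_set]
      by_cases hc : p.2 = q.2
      · rw [hc, List.set_set]
      · rw [List.set_comm _ _ hc]
    · have hb : ∀ (x : List String), b.set p.1 x = b := fun x => List.set_eq_of_length_le (by omega)
      simp only [hb]
  · rw [List.getElem?_set_ne hr, List.getElem?_set_ne (fun hh => hr hh.symm), List.set_comm _ _ hr]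

-- ----- batch-write machinery -----

theorem pvFL_setP (L : List (Nat × Nat)) (b : List (List String)) (x : Nat × Nat) :
    pvFL L (pvSetP b x "a") = pvSetP (pvFL L b) x "a" := by
  induction L generalizing b with
  | nil => rfl
  | cons y L ih =>
    simp only [pvFL, List.foldl_cons] at *
    rw [pvSetP_comm, ih]

theorem pvFL_eq_FR (L : List (Nat × Nat)) (b : List (List String)) :
    pvFL L b = pvFR L b := by
  induction L generalizing b with
  | nil => rfl
  | cons y L ih =>
    simp only [pvFL, pvFR, List.foldl_cons, List.foldr_cons] at *
    rw [show (List.foldl (fun acc p => pvSetP acc p "a") (pvSetP b y "a") L)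
        = pvFL L (pvSetP b y "a") from rfl, pvFL_setP]
    exact congrArg (fun z => pvSetP z y "a") (ih b)

theorem pvFR_setP (L : List (Nat × Nat)) (b : List (List String)) (x : Nat × Nat) :
    pvFR L (pvSetP b x "a") = pvSetP (pvFR L b) x "a" := by
  rw [← pvFL_eq_FR, ← pvFL_eq_FR]; exact pvFL_setP L b x

theorem pvFR_swap (X Y : List (Nat × Nat)) (b : List (List String)) :
    pvFR X (pvFR Y b) = pvFR Y (pvFR X b) := by
  induction Y generalizing b with
  | nil => rfl
  | cons y Y ih =>
    show pvFR X (pvSetP (pvFR Y b) y "a") = pvSetP (pvFR Y (pvFR X b)) y "a"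
    rw [pvFR_setP, ih]

theorem pvPhys_FR (L : List (Nat × Nat)) (b : List (List String)) (r c : Int) :
    pvPhys (pvFR L b) r c = pvPhys b r c := by
  induction L with
  | nil => rfl
  | cons y L ih => simp only [pvFR, List.foldr_cons] at *; rw [pvPhys_setP, ih]

theorem pvValid_FR (L : List (Nat × Nat)) (b : List (List String)) (q : Nat × Nat) :
    pvValid (pvFR L b) q ↔ pvValid b q := by
  induction L with
  | nil => exact Iff.rfl
  | cons y L ih => simp only [pvFR, List.foldr_cons] at *; rw [pvValid_setP, ih]

theorem pvCellP_FR (L : List (Nat × Nat)) (b : List (List String)) (q : Nat × Nat)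
    (h : pvCellP b q = "*" ∨ pvCellP b q = "a") :
    pvCellP (pvFR L b) q = "*" ∨ pvCellP (pvFR L b) q = "a" := by
  induction L with
  | nil => exact h
  | cons y L ih =>
    have e : pvFR (y :: L) b = pvSetP (pvFR L b) y "a" := rfl
    rw [e]
    rcases pvCellP_setP_cases (pvFR L b) y q "a" with h1 | h1 <;> rw [h1]
    · exact Or.inr rfl
    · exact ih

theorem pvValid_set2 (b : List (List String)) (r c : Int) (v : String) (q : Nat × Nat) :
    pvValid (pvSet2 b r c v) q ↔ pvValid b q := by
  rw [pvSet2_eq_phys]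
  cases pvPhys b r c with
  | none => exact Iff.rfl
  | some p => exact pvValid_setP b p q v

theorem pvCellP_set2_cases (b : List (List String)) (r c : Int) (v : String) (q : Nat × Nat) :
    pvCellP (pvSet2 b r c v) q = v ∨ pvCellP (pvSet2 b r c v) q = pvCellP b q := by
  rw [pvSet2_eq_phys]
  cases pvPhys b r c with
  | none => exact Or.inr rfl
  | some p => exact pvCellP_setP_cases b p q v

-- ----- the walk (A) against deferred writes (B) -----

theorem pvValid_walkA (ps : List (Int × Int)) (b : List (List String)) (q : Nat × Nat) :
    pvValid (pvWalkA ps b) q ↔ pvValid b q := by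
  induction ps generalizing b with
  | nil => exact Iff.rfl
  | cons x rest ih =>
    obtain ⟨rx, cx⟩ := x
    simp only [pvWalkA]
    cases h : pvCell b rx cx with
    | none => simp only [h]
    | some s =>
      simp only [h]
      split_ifs with h1 h2
      · exact Iff.rfl
      · rw [ih, pvValid_set2]
      · exact ih _

-- an "a" cell stays "a": the walk only ever writes "a"
theorem pvWalkA_pres (ps : List (Int × Int)) (b : List (List String)) (q : Nat × Nat)
    (h : pvCellP b q = "a") : pvCellP (pvWalkA ps b) q = "a" := by
  induction ps generalizing b with
  | nil => exact h
  | cons x rest ih =>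
    obtain ⟨rx, cx⟩ := x
    simp only [pvWalkA]
    cases hc : pvCell b rx cx with
    | none => simp only [hc]; exact h
    | some s =>
      simp only [hc]
      split_ifs with h1 h2
      · exact h
      · refine ih _ ?_
        rcases pvCellP_set2_cases b rx cx "a" q with hh | hh <;> rw [hh]
        exact h
      · exact ih _ h

-- KEY: marking an attacked square commutes with the whole walk
theorem pvWalkA_setP (ps : List (Int × Int)) : ∀ (b : List (List String)) (p : Nat × Nat),
    (pvCellP b p = "*" ∨ pvCellP b p = "a") → pvValid b p →
    pvWalkA ps (pvSetP b p "a") = pvSetP (pvWalkA ps b) p "a" := by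
  induction ps with
  | nil => intro b p _ _; rfl
  | cons x rest ih =>
    intro b p hs hv
    obtain ⟨rx, cx⟩ := x
    simp only [pvWalkA]
    have hca := pvCell_eq_phys b rx cx
    have hcb := pvCell_eq_phys (pvSetP b p "a") rx cx
    rw [pvPhys_setP] at hcb
    cases hphys : pvPhys b rx cx with
    | none =>
      rw [hphys, Option.map_none] at hca hcb
      simp only [hca, hcb]
    | some q =>
      rw [hphys, Option.map_some] at hca hcb
      have hvq : pvValid b q := pvPhys_valid hphys
      have hset2 : pvSet2 b rx cx "a" = pvSetP b q "a" := by
        rw [pvSet2_eq_phys, hphys]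
      by_cases hqp : q = p
      · subst hqp
        have hcb' : pvCellP (pvSetP b q "a") q = "a" := pvCellP_setP_self "a" hv
        rw [hcb'] at hcb
        simp only [hca, hcb]
        rw [if_neg (by decide : ¬("a":String) = "K"), if_neg (by decide : ¬("a":String) = "*")]
        rcases hs with hs | hs
        · rw [hs, if_neg (by decide : ¬("*":String) = "K"), if_pos rfl]
          have h1 : pvCellP (pvWalkA rest (pvSetP b q "a")) q = "a" :=
            pvWalkA_pres rest _ q hcb'
          have h2 : pvValid (pvWalkA rest (pvSetP b q "a")) q :=
            (pvValid_walkA rest _ q).mpr ((pvValid_setP b q q "a").mpr hv)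
          rw [hset2, pvSetP_same h2 h1]
        · rw [hs, if_neg (by decide : ¬("a":String) = "K"), if_neg (by decide : ¬("a":String) = "*")]
          have hbb : pvSetP b q "a" = b := pvSetP_same hv hs
          rw [hbb]
          have h1 : pvCellP (pvWalkA rest b) q = "a" := pvWalkA_pres rest b q hs
          have h2 : pvValid (pvWalkA rest b) q := (pvValid_walkA rest b q).mpr hv
          rw [pvSetP_same h2 h1]
      · have hcb' : pvCellP (pvSetP b p "a") q = pvCellP b q := pvCellP_setP_ne "a" hqp
        rw [hcb'] at hcb
        simp only [hca, hcb]
        by_cases hK : pvCellP b q = "K"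
        · simp only [hK, if_true]
        · simp only [hK, if_false]
          by_cases hA : pvCellP b q = "*"
          · simp only [hA, if_true, reduceIte]
            have hset2' : pvSet2 (pvSetP b p "a") rx cx "a" = pvSetP (pvSetP b p "a") q "a" := by
              rw [pvSet2_eq_phys, pvPhys_setP, hphys]
            rw [hset2', pvSetP_comm, hset2]
            have hs' : pvCellP (pvSetP b q "a") p = "*" ∨ pvCellP (pvSetP b q "a") p = "a" := by
              rw [pvCellP_setP_ne "a" (fun hh => hqp hh.symm)]; exact hs
            exact ih (pvSetP b q "a") p hs' ((pvValid_setP b q p "a").mpr hv)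
          · simp only [hA, if_false]
            exact ih b p hs hv

theorem pvCollectP_mem {ps : List (Int × Int)} {b : List (List String)} {q : Nat × Nat}
    (h : q ∈ pvCollectP ps b) : pvCellP b q = "*" ∧ pvValid b q := by
  induction ps with
  | nil => simp [pvCollectP] at h
  | cons x rest ih =>
    obtain ⟨rx, cx⟩ := x
    simp only [pvCollectP] at h
    cases hphys : pvPhys b rx cx with
    | none => simp [hphys] at h
    | some p =>
      simp only [hphys] at h
      by_cases hK : pvCellP b p = "K"
      · rw [if_pos hK] at h; simp at h
      · rw [if_neg hK] at h
        by_cases hA : pvCellP b p = "*"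
        · rw [if_pos hA] at h
          rcases List.mem_cons.mp h with h | h
          · subst h; exact ⟨hA, pvPhys_valid hphys⟩
          · exact ih h
        · rw [if_neg hA] at h; exact ih h

-- A's interleaved walk is exactly: collect first, then write
theorem pvWalkA_eq_FR (ps : List (Int × Int)) (b : List (List String)) :
    pvWalkA ps b = pvFR (pvCollectP ps b) b := by
  induction ps generalizing b with
  | nil => rfl
  | cons x rest ih =>
    obtain ⟨rx, cx⟩ := x
    simp only [pvWalkA, pvCollectP, pvCell_eq_phys]
    cases hphys : pvPhys b rx cx with
    | none => simp only [Option.map_none]; rfl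
    | some p =>
      simp only [Option.map_some]
      by_cases hK : pvCellP b p = "K"
      · rw [if_pos hK, if_pos hK]; rfl
      · rw [if_neg hK, if_neg hK]
        by_cases hA : pvCellP b p = "*"
        · rw [if_pos hA, if_pos hA]
          have hset2 : pvSet2 b rx cx "a" = pvSetP b p "a" := by
            rw [pvSet2_eq_phys, hphys]
          rw [hset2, pvWalkA_setP rest b p (Or.inl hA) (pvPhys_valid hphys), ih]
          rfl
        · rw [if_neg hA, if_neg hA]; exact ih b

-- the walk also commutes with a whole batch of deferred writes of earlier diagonals
theorem pvWalkA_FR (ps : List (Int × Int)) (L : List (Nat × Nat)) (b : List (List String))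
    (h : ∀ x ∈ L, (pvCellP b x = "*" ∨ pvCellP b x = "a") ∧ pvValid b x) :
    pvWalkA ps (pvFR L b) = pvFR L (pvWalkA ps b) := by
  induction L with
  | nil => rfl
  | cons x L ih =>
    have e : ∀ (z : List (List String)), pvFR (x :: L) z = pvSetP (pvFR L z) x "a" := fun _ => rfl
    rw [e, e]
    obtain ⟨⟨hsx, hvx⟩, hrest⟩ := (List.forall_mem_cons.mp h : _)
    rw [pvWalkA_setP ps (pvFR L b) x (pvCellP_FR L b x hsx) ((pvValid_FR L b x).mpr hvx),
      ih hrest]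

-- ----- relating B's scan to the path collect -----

theorem pvFoldSet2_eq_FL (ps : List (Int × Int)) (b b0 : List (List String))
    (h : ∀ r c, pvPhys b0 r c = pvPhys b r c) :
    (pvCollectI ps b).foldl (fun acc p => pvSet2 acc p.1 p.2 "a") b0
      = pvFL (pvCollectP ps b) b0 := by
  induction ps generalizing b0 with
  | nil => rfl
  | cons x rest ih =>
    obtain ⟨rx, cx⟩ := x
    simp only [pvCollectI, pvCollectP, pvCell_eq_phys]
    cases hphys : pvPhys b rx cx with
    | none => simp only [Option.map_none]; rfl
    | some p =>
      simp only [Option.map_some]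
      by_cases hK : pvCellP b p = "K"
      · rw [if_pos hK, if_pos hK]; rfl
      · rw [if_neg hK, if_neg hK]
        by_cases hA : pvCellP b p = "*"
        · rw [if_pos hA, if_pos hA]
          simp only [List.foldl_cons, pvFL]
          have hset2 : pvSet2 b0 rx cx "a" = pvSetP b0 p "a" := by
            rw [pvSet2_eq_phys, h rx cx, hphys]
          rw [hset2]
          exact ih (pvSetP b0 p "a") (fun r c => by rw [pvPhys_setP]; exact h r c)
        · rw [if_neg hA, if_neg hA]; exact ih b0 h

def pvCnt (d x : Int) : Int := if d < 0 then x else 7 - x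

theorem pvScan_eq_collectI : ∀ (fuel : Nat) (r c dr dc : Int) (b : List (List String)),
    (dr = -1 ∨ dr = 1) → (dc = -1 ∨ dc = 1) →
    (min (pvCnt dr r) (pvCnt dc c)).toNat ≤ fuel →
    pvScan fuel (r + dr) (c + dc) dr dc b
      = pvCollectI (pvPathN (min (pvCnt dr r) (pvCnt dc c)).toNat r c dr dc) b := by
  intro fuel
  induction fuel with
  | zero =>
    intro r c dr dc b hdr hdc hf
    have hn : (min (pvCnt dr r) (pvCnt dc c)).toNat = 0 := by omega
    rw [hn]
    rfl
  | succ f ih =>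
    intro r c dr dc b hdr hdc hf
    by_cases hn : (min (pvCnt dr r) (pvCnt dc c)).toNat = 0
    · rw [hn]
      show pvScan (f+1) (r+dr) (c+dc) dr dc b = []
      simp only [pvScan]
      rw [if_pos ?_]
      rcases hdr with h | h <;> rcases hdc with h2 | h2 <;> subst h <;> subst h2 <;>
        simp [pvCnt] at hn ⊢ <;> omega
    · obtain ⟨m, hm'⟩ : ∃ m, (min (pvCnt dr r) (pvCnt dc c)).toNat = m + 1 :=
        ⟨(min (pvCnt dr r) (pvCnt dc c)).toNat - 1, by omega⟩
      have harith : (min (pvCnt dr (r + dr)) (pvCnt dc (c + dc))).toNat = m := by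
        rcases hdr with h | h <;> rcases hdc with h2 | h2 <;> subst h <;> subst h2 <;>
          simp [pvCnt] at hm' ⊢ <;> omega
      have hgrd : ¬((if dr < 0 then r + dr < 0 else r + dr > 7) ∨
          if dc < 0 then c + dc < 0 else c + dc > 7) := by
        rcases hdr with h | h <;> rcases hdc with h2 | h2 <;> subst h <;> subst h2 <;>
          simp [pvCnt] at hm' ⊢ <;> omega
      rw [hm']
      simp only [pvPathN, pvCollectI, pvScan]
      rw [if_neg hgrd]
      cases hc : pvCell b (r + dr) (c + dc) with
      | none => simp only [hc]
      | some sv =>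
        simp only [hc]
        by_cases hK : sv = "K"
        · rw [if_pos hK, if_pos hK]
        · rw [if_neg hK, if_neg hK]
          have hrec := ih (r + dr) (c + dc) dr dc b hdr hdc (by omega)
          rw [harith] at hrec
          by_cases hA : sv = "*"
          · rw [if_pos hA, if_pos hA, hrec]
          · rw [if_neg hA, if_neg hA, hrec]

-- ----- the four diagonals as pvPathN (zip of two ranges) -----

theorem pvZip_map_range {α β : Type} (n1 n2 : Nat) (f : Nat → α) (g : Nat → β) :
    ((List.range n1).map f).zip ((List.range n2).map g)
      = (List.range (min n1 n2)).map (fun k => (f k, g k)) := by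
  apply List.ext_getElem
  · simp
  · intro i h1 h2
    simp [List.getElem_zip]

theorem pvPathN_eq_map (dr dc : Int) : ∀ (n : Nat) (r c : Int),
    pvPathN n r c dr dc = (List.range n).map (fun (k : Nat) => (r + dr * ((k : Int) + 1), c + dc * ((k : Int) + 1))) := by
  intro n
  induction n with
  | zero => intro r c; rfl
  | succ n ih =>
    intro r c
    rw [List.range_succ_eq_map]
    simp only [pvPathN, ih, List.map_cons, List.map_map]
    refine congrArg₂ List.cons ?_ ?_
    · simp
    · apply List.map_congr_left
      intro k _
      simp only [Function.comp_apply, Prod.mk.injEq]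
      constructor <;> push_cast <;> ring

theorem pvDir_mm (ar ac : Int) :
    (PySem.List.pyRange (ar - 1) (-1) (-1)).zip (PySem.List.pyRange (ac - 1) (-1) (-1))
      = pvPathN (min ar ac).toNat ar ac (-1) (-1) := by
  rw [PySem.List.pyRange_neg_one, PySem.List.pyRange_neg_one, pvZip_map_range,
    pvPathN_eq_map, show min (ar - 1 - -1).toNat (ac - 1 - -1).toNat = (min ar ac).toNat by omega]
  apply List.map_congr_left
  intro k _
  simp only [Prod.mk.injEq]
  constructor <;> ring

theorem pvDir_mp (ar ac : Int) :
    (PySem.List.pyRange (ar - 1) (-1) (-1)).zip (PySem.List.pyRange (ac + 1) 8 1)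
      = pvPathN (min ar (7 - ac)).toNat ar ac (-1) 1 := by
  rw [PySem.List.pyRange_neg_one, PySem.List.pyRange_one, pvZip_map_range,
    pvPathN_eq_map, show min (ar - 1 - -1).toNat (8 - (ac + 1)).toNat = (min ar (7 - ac)).toNat by omega]
  apply List.map_congr_left
  intro k _
  simp only [Prod.mk.injEq]
  constructor <;> ring

theorem pvDir_pm (ar ac : Int) :
    (PySem.List.pyRange (ar + 1) 8 1).zip (PySem.List.pyRange (ac - 1) (-1) (-1))
      = pvPathN (min (7 - ar) ac).toNat ar ac 1 (-1) := by
  rw [PySem.List.pyRange_one, PySem.List.pyRange_neg_one, pvZip_map_range,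
    pvPathN_eq_map, show min (8 - (ar + 1)).toNat (ac - 1 - -1).toNat = (min (7 - ar) ac).toNat by omega]
  apply List.map_congr_left
  intro k _
  simp only [Prod.mk.injEq]
  constructor <;> ring

theorem pvDir_pp (ar ac : Int) :
    (PySem.List.pyRange (ar + 1) 8 1).zip (PySem.List.pyRange (ac + 1) 8 1)
      = pvPathN (min (7 - ar) (7 - ac)).toNat ar ac 1 1 := by
  rw [PySem.List.pyRange_one, PySem.List.pyRange_one, pvZip_map_range,
    pvPathN_eq_map, show min (8 - (ar + 1)).toNat (8 - (ac + 1)).toNat = (min (7 - ar) (7 - ac)).toNat by omega]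
  apply List.map_congr_left
  intro k _
  simp only [Prod.mk.injEq]
  constructor <;> ring

-- ----- assembly -----

theorem pvPhys_FL (L : List (Nat × Nat)) (b : List (List String)) (r c : Int) :
    pvPhys (pvFL L b) r c = pvPhys b r c := by
  rw [pvFL_eq_FR]; exact pvPhys_FR L b r c

theorem pvMemC {ps : List (Int × Int)} {b : List (List String)} :
    ∀ x ∈ pvCollectP ps b, (pvCellP b x = "*" ∨ pvCellP b x = "a") ∧ pvValid b x :=
  fun _ hx => ⟨Or.inl (pvCollectP_mem hx).1, (pvCollectP_mem hx).2⟩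

theorem pvMemC_FR {ps : List (Int × Int)} {b : List (List String)} (L : List (Nat × Nat)) :
    ∀ x ∈ pvCollectP ps b,
      (pvCellP (pvFR L b) x = "*" ∨ pvCellP (pvFR L b) x = "a") ∧ pvValid (pvFR L b) x :=
  fun _ hx => ⟨pvCellP_FR L b _ (Or.inl (pvCollectP_mem hx).1),
    (pvValid_FR L b _).mpr (pvCollectP_mem hx).2⟩

theorem pvPorts_eq (amazon_col amazon_row : Int) (board : List (List String)) :
    fill_amazon_diagonals amazon_col amazon_row board
      = fill_amazon_diagonals_alt amazon_col amazon_row board := by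
  have e1 : pvCnt (-1) amazon_row = amazon_row := by norm_num [pvCnt]
  have e2 : pvCnt (-1) amazon_col = amazon_col := by norm_num [pvCnt]
  have e3 : pvCnt 1 amazon_row = 7 - amazon_row := by norm_num [pvCnt]
  have e4 : pvCnt 1 amazon_col = 7 - amazon_col := by norm_num [pvCnt]
  have hs1 := pvScan_eq_collectI (amazon_row.natAbs + amazon_col.natAbs + 20)
    amazon_row amazon_col (-1) (-1) board (Or.inl rfl) (Or.inl rfl) (by rw [e1, e2]; omega)
  have hs2 := pvScan_eq_collectI (amazon_row.natAbs + amazon_col.natAbs + 20)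
    amazon_row amazon_col (-1) 1 board (Or.inl rfl) (Or.inr rfl) (by rw [e1, e4]; omega)
  have hs3 := pvScan_eq_collectI (amazon_row.natAbs + amazon_col.natAbs + 20)
    amazon_row amazon_col 1 (-1) board (Or.inr rfl) (Or.inl rfl) (by rw [e3, e2]; omega)
  have hs4 := pvScan_eq_collectI (amazon_row.natAbs + amazon_col.natAbs + 20)
    amazon_row amazon_col 1 1 board (Or.inr rfl) (Or.inr rfl) (by rw [e3, e4]; omega)
  rw [e1, e2] at hs1
  rw [e1, e4] at hs2
  rw [e3, e2] at hs3
  rw [e3, e4] at hs4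
  simp only [fill_amazon_diagonals, fill_amazon_diagonals_alt]
  rw [pvDir_mm, pvDir_mp, pvDir_pm, pvDir_pp,
    show amazon_row - 1 = amazon_row + (-1) from by ring,
    show amazon_col - 1 = amazon_col + (-1) from by ring,
    hs1, hs2, hs3, hs4, List.foldl_append, List.foldl_append, List.foldl_append]
  -- name the four paths and their collected mark lists
  set P1 := pvPathN (min amazon_row amazon_col).toNat amazon_row amazon_col (-1) (-1) with hP1
  set P2 := pvPathN (min amazon_row (7 - amazon_col)).toNat amazon_row amazon_col (-1) 1 with hP2
  set P3 := pvPathN (min (7 - amazon_row) amazon_col).toNat amazon_row amazon_col 1 (-1) with hP3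
  set P4 := pvPathN (min (7 - amazon_row) (7 - amazon_col)).toNat amazon_row amazon_col 1 1 with hP4
  set C1 := pvCollectP P1 board with hC1
  set C2 := pvCollectP P2 board with hC2
  set C3 := pvCollectP P3 board with hC3
  set C4 := pvCollectP P4 board with hC4
  -- B side: each segment of the batch write is a pvFL of the physical marks
  rw [pvFoldSet2_eq_FL P1 board board (fun _ _ => rfl),
    pvFoldSet2_eq_FL P2 board _ (fun r c => pvPhys_FL C1 board r c),
    pvFoldSet2_eq_FL P3 board _ (fun r c => by rw [pvPhys_FL, pvPhys_FL]),
    pvFoldSet2_eq_FL P4 board _ (fun r c => by rw [pvPhys_FL, pvPhys_FL, pvPhys_FL]),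
    pvFL_eq_FR, pvFL_eq_FR, pvFL_eq_FR, pvFL_eq_FR]
  -- A side: pull each walk's deferred writes out past the earlier diagonals' writes
  rw [pvWalkA_eq_FR P1 board,
    pvWalkA_FR P2 C1 board pvMemC, pvWalkA_eq_FR P2 board,
    pvWalkA_FR P3 C1 (pvFR C2 board) (pvMemC_FR C2),
    pvWalkA_FR P3 C2 board pvMemC, pvWalkA_eq_FR P3 board,
    pvWalkA_FR P4 C1 (pvFR C2 (pvFR C3 board)) (fun x hx =>
      ⟨pvCellP_FR C2 _ x (pvCellP_FR C3 board x (Or.inl (pvCollectP_mem hx).1)),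
        (pvValid_FR C2 _ x).mpr ((pvValid_FR C3 board x).mpr (pvCollectP_mem hx).2)⟩),
    pvWalkA_FR P4 C2 (pvFR C3 board) (pvMemC_FR C3),
    pvWalkA_FR P4 C3 board pvMemC, pvWalkA_eq_FR P4 board]
  -- both sides are now stacks of pvFR writes; reorder them
  rw [pvFR_swap C3 C4 board, pvFR_swap C2 C4 (pvFR C3 board),
    pvFR_swap C1 C4 (pvFR C2 (pvFR C3 board)), pvFR_swap C2 C3 board,
    pvFR_swap C1 C3 (pvFR C2 board), pvFR_swap C1 C2 board]

-- ===== VERDICT (by name: the statement is the Claim_ definition above) =====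
theorem fill_amazon_diagonals_spec : Claim_equal_fill_amazon_diagonals := by
  intro amazon_col amazon_row board _ _
  exact pvPorts_eq amazon_col amazon_row board
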